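-- pv_equiv track=rewrite | github.com/AndrewPlayer3/sar_processing | s1_level0/s1_level0_utils.py | huffman_3
-- ===== SOURCE A (Python) =====
-- def read_and_pop(bit_string: str, bit_length: int):
--     return bit_string[0:bit_length], bit_string[bit_length:]
--
-- def bit_len_map(brc: int):
--     match brc:
--         case 0:
--             k = 4
--         case 1:
--             k = 5
--         case 2:
--             k = 7
--         case 3:
--             k = 10
--         case 4:
--             k = 16
--         case other:
--             raise ValueError(f'Invalid BRC Value Encountered in `bit_len_map`: {brc}')
--     return k
--
-- def huffman_3(bit_string):
--     k = bit_len_map(3)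
--     m_code = 0
--     bit, bit_string = read_and_pop(bit_string, 1)
--     bit_len = 1
--     if bit == '0':
--         bit, bit_string = read_and_pop(bit_string, 1)
--         bit_len += 1
--         if bit == '0':
--             return 0, bit_string, bit_len
--         else:
--             return 1, bit_string, bit_len
--     else:
--         m_code = 2
--         for i in range(k - 3):
--             bit, bit_string = read_and_pop(bit_string, 1)
--             bit_len += 1
--             if bit == '0':
--                 break
--             else:
--                 m_code += 1
--         return m_code, bit_string, bit_len
-- ===== SOURCE B (Python) =====
-- def huffman_3(bit_string):
--     z = bit_string.find('0')
--     if z == 0: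
--         return (0 if bit_string[1:2] == '0' else 1), bit_string[2:], 2
--     if z < 0 or z >= 8:
--         return 9, bit_string[8:], 8
--     return z + 1, bit_string[z + 1:], z + 1
-- ===== Notes on version B (the rewrite author's own statement) =====
-- stated objective: simpler
-- what changed: Replaced the bit-by-bit read_and_pop loop (pop one character, test, count, break) with a single str.find locating the first terminating zero bit, followed by three-way arithmetic branching on that index.
import Mathlib
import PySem

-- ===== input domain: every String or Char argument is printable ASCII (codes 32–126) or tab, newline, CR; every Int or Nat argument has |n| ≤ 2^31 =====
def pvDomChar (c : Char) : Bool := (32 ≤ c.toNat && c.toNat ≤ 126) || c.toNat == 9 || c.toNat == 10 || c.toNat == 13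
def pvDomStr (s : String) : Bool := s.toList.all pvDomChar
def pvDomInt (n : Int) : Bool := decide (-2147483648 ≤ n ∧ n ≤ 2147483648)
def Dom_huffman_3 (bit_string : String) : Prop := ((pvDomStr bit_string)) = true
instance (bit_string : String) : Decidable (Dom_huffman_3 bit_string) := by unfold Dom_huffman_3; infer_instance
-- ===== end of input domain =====

-- B replaces A's bit-by-bit read_and_pop loop with one str.find of the first terminating zero bit plus
-- arithmetic on that index (objective: simpler). Return values proved equal on all inputs in the domain.

-- ===== PORT A =====
def read_and_pop (bit_string : String) (bit_length : Int) : String × String :=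
  (PySem.Str.slice bit_string (some 0) (some bit_length),
   PySem.Str.slice bit_string (some bit_length) none)

-- Python raises ValueError on the fall-through branch; huffman_3 only ever calls this with 3,
-- so that branch is unreachable (0 stands in for the raise).
def bit_len_map (brc : Int) : Int :=
  if brc = 0 then 4
  else if brc = 1 then 5
  else if brc = 2 then 7
  else if brc = 3 then 10
  else if brc = 4 then 16
  else 0

-- the 'for i in range(k - 3): … break …' loop of A, with state (bit_string, bit_len, m_code)
def huffman_3_loop : List Int → String → Int → Int → Int × String × Int
  | [], bs, bit_len, m_code => (m_code, bs, bit_len)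
  | _ :: rest, bs, bit_len, m_code =>
    let p := read_and_pop bs 1
    let bit_len' := bit_len + 1
    if p.1 = "0" then (m_code, p.2, bit_len')
    else huffman_3_loop rest p.2 bit_len' (m_code + 1)

def huffman_3 (bit_string : String) : Int × String × Int :=
  let k := bit_len_map 3
  let p := read_and_pop bit_string 1
  let bit := p.1
  let bs := p.2
  let bit_len : Int := 1
  if bit = "0" then
    let p2 := read_and_pop bs 1
    let bit_len2 := bit_len + 1
    if p2.1 = "0" then (0, p2.2, bit_len2) else (1, p2.2, bit_len2)
  else
    huffman_3_loop (PySem.List.pyRange 0 (k - 3) 1) bs bit_len 2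

-- ===== PORT B =====
def huffman_3_alt (bit_string : String) : Int × String × Int :=
  let z := PySem.Str.find bit_string "0"
  if z = 0 then
    ((if PySem.Str.slice bit_string (some 1) (some 2) = "0" then (0 : Int) else 1),
     PySem.Str.slice bit_string (some 2) none, 2)
  else if z < 0 ∨ 8 ≤ z then
    (9, PySem.Str.slice bit_string (some 8) none, 8)
  else
    (z + 1, PySem.Str.slice bit_string (some (z + 1)) none, z + 1)

-- ===== PRECONDITION & SPEC =====
def Spec_huffman_3 (bit_string : String) (out : Int × String × Int) : Prop := out = huffman_3_alt bit_string
instance (bit_string : String) (out : Int × String × Int) : Decidable (Spec_huffman_3 bit_string out) := by unfold Spec_huffman_3; infer_instance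

-- ===== CLAIM (what is proved, stated in full; the proofs are below) =====
def Claim_equal_huffman_3 : Prop := ∀ (bit_string : String), Dom_huffman_3 bit_string → Spec_huffman_3 bit_string (huffman_3 bit_string)

-- ===== LEMMAS AND PROOFS =====

theorem toList_slice_nat (s : String) (a b : Nat) :
    (PySem.Str.slice s (some (a:Int)) (some (b:Int))).toList = (s.toList.drop a).take (b-a) := by
  rw [PySem.Str.toList_slice, PySem.Chars.slice_eq_listSlice, PySem.List.slice_natCast]
theorem toList_slice_from (s : String) (a : Nat) :
    (PySem.Str.slice s (some (a:Int)) none).toList = s.toList.drop a := by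
  rw [PySem.Str.toList_slice, PySem.Chars.slice_eq_listSlice, PySem.List.slice_from_natCast]
theorem toList_slice_from_int (s : String) (a : Int) (h : 0 ≤ a) :
    (PySem.Str.slice s (some a) none).toList = s.toList.drop a.toNat := by
  rw [PySem.Str.toList_slice, PySem.Chars.slice_eq_listSlice, PySem.List.slice_from _ h]
theorem rap_fst (bs : String) : (read_and_pop bs 1).1.toList = bs.toList.take 1 := by
  unfold read_and_pop
  rw [show (0:Int) = ((0:Nat):Int) by norm_num, show (1:Int) = ((1:Nat):Int) by norm_num,
    toList_slice_nat]
  simp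
theorem rap_snd (bs : String) : (read_and_pop bs 1).2.toList = bs.toList.drop 1 := by
  unfold read_and_pop
  rw [show (1:Int) = ((1:Nat):Int) by norm_num, toList_slice_from]
theorem str_ne (a b : String) (h : a.toList ≠ b.toList) : a ≠ b := fun hab => h (by rw [hab])
theorem str_eq (a b : String) (h : a.toList = b.toList) : a = b := String.toList_inj.mp h

theorem find_go_shift (sub cs : List Char) (k : Nat) :
    PySem.Chars.find.go sub cs k =
      if PySem.Chars.find.go sub cs 0 = -1 then -1 else (k : Int) + PySem.Chars.find.go sub cs 0 := by
  induction cs generalizing k with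
  | nil =>
    by_cases h : sub.isEmpty <;> simp [PySem.Chars.find.go, h]
  | cons c t ih =>
    by_cases h : sub.isPrefixOf (c :: t) = true
    · simp [PySem.Chars.find.go, h]
    · have h1 := ih 1
      have hk := ih (k + 1)
      simp only [PySem.Chars.find.go, h] at *
      rw [hk, h1]
      by_cases h2 : PySem.Chars.find.go sub t 0 = -1
      · simp [h2]
      · have hge : -1 ≤ PySem.Chars.find.go sub t 0 := by
          have := PySem.Chars.neg_one_le_find t sub
          simpa [PySem.Chars.find] using this
        have : ¬ ((1 : Int) + PySem.Chars.find.go sub t 0 = -1) := by omega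
        simp [h2, this]
        omega

theorem find0_cons_head (cs : List Char) : PySem.Chars.find ('0' :: cs) ['0'] = 0 := by
  simp [PySem.Chars.find, PySem.Chars.find.go]

theorem find0_cons_ne (c : Char) (cs : List Char) (h : ¬ c = '0') :
    PySem.Chars.find (c :: cs) ['0'] =
      if PySem.Chars.find cs ['0'] = -1 then -1 else 1 + PySem.Chars.find cs ['0'] := by
  have hne : ('0' = c) = False := by simp [eq_comm, h]
  simp only [PySem.Chars.find, PySem.Chars.find.go, List.isPrefixOf, hne,
    Bool.and_eq_true, beq_iff_eq]
  rw [find_go_shift]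
  simp

theorem find0_nonneg_lt (cs : List Char) (h : PySem.Chars.find cs ['0'] ≠ -1) :
    0 ≤ PySem.Chars.find cs ['0'] ∧ PySem.Chars.find cs ['0'] < cs.length := by
  refine ⟨by have := PySem.Chars.neg_one_le_find cs ['0']; omega, ?_⟩
  have hle := PySem.Chars.find_le_length cs ['0']
  rcases lt_or_eq_of_le hle with h1 | h1
  · exact h1
  · exfalso
    have hpos : 0 ≤ PySem.Chars.find cs ['0'] := by
      have := PySem.Chars.neg_one_le_find cs ['0']; omega
    have hspec := (PySem.Chars.find_spec (s := cs) (sub := ['0']) hpos).1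
    rw [h1] at hspec
    simp at hspec

theorem loop_eq (r : List Int) (bs : String) (bit_len m_code : Int) :
    huffman_3_loop r bs bit_len m_code =
      (let z := PySem.Chars.find bs.toList ['0']
       if 0 ≤ z ∧ z < (r.length : Int) then
         (m_code + z, String.ofList (bs.toList.drop (z + 1).toNat), bit_len + z + 1)
       else
         (m_code + r.length, String.ofList (bs.toList.drop r.length), bit_len + r.length)) := by
  induction r generalizing bs bit_len m_code with
  | nil =>
    simp only [huffman_3_loop, List.length_nil, Nat.cast_zero, List.drop_zero]
    have hc : ¬ (0 ≤ PySem.Chars.find bs.toList ['0'] ∧ PySem.Chars.find bs.toList ['0'] < (0:Int)) := by omega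
    rw [if_neg hc]
    refine Prod.ext (by ring) (Prod.ext ?_ (by push_cast [List.length_cons]; ring))
    exact (str_eq _ _ (by simp)).symm
  | cons hd rest ih =>
    rw [huffman_3_loop]
    rcases hbs : bs.toList with _ | ⟨c, t⟩
    · have hb1 : (read_and_pop bs 1).1 ≠ "0" := by
        apply str_ne; rw [rap_fst, hbs]; decide
      rw [if_neg hb1, ih]
      have hb2 : (read_and_pop bs 1).2.toList = [] := by rw [rap_snd, hbs]; rfl
      have hfind : PySem.Chars.find ([] : List Char) ['0'] = -1 := by decide
      simp only [hb2, hfind]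
      have hc1 : ¬ ((0:Int) ≤ -1 ∧ (-1:Int) < (rest.length : Int)) := by omega
      have hc2 : ¬ ((0:Int) ≤ -1 ∧ (-1:Int) < ((hd :: rest).length : Int)) := by omega
      rw [if_neg hc1, if_neg hc2]
      refine Prod.ext (by push_cast [List.length_cons]; ring) (Prod.ext (by simp) (by push_cast [List.length_cons]; ring))
    · have hb1 : (read_and_pop bs 1).1.toList = [c] := by rw [rap_fst, hbs]; rfl
      have hb2 : (read_and_pop bs 1).2.toList = t := by rw [rap_snd, hbs]; rfl
      by_cases hc : c = '0'
      · have hbit : (read_and_pop bs 1).1 = "0" := by apply str_eq; rw [hb1, hc]; rfl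
        rw [if_pos hbit]
        have hfind : PySem.Chars.find (c :: t) ['0'] = 0 := by
          rw [hc]; exact find0_cons_head t
        simp only [hfind]
        rw [if_pos (by refine ⟨by omega, by push_cast [List.length_cons]; omega⟩)]
        refine Prod.ext (by ring) (Prod.ext (by apply str_eq; simp [hb2]) (by ring))
      · have hbit : (read_and_pop bs 1).1 ≠ "0" := by
          apply str_ne; simp [hb1, hc]
        rw [if_neg hbit, ih]
        have hfind := find0_cons_ne c t hc
        simp only [hb2, hfind]
        by_cases h2 : PySem.Chars.find t ['0'] = -1
        · simp only [h2, reduceIte]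
          have hcA : ¬ ((0:Int) ≤ -1 ∧ (-1:Int) < (rest.length : Int)) := by omega
          have hcB : ¬ ((0:Int) ≤ -1 ∧ (-1:Int) < ((hd :: rest).length : Int)) := by omega
          rw [if_neg hcA, if_neg hcB]
          refine Prod.ext (by push_cast [List.length_cons]; ring)
            (Prod.ext (by simp) (by push_cast [List.length_cons]; ring))
        · obtain ⟨hge, _⟩ := find0_nonneg_lt t h2
          set z' := PySem.Chars.find t ['0'] with hz'
          simp only [if_neg h2]
          by_cases h3 : 0 ≤ z' ∧ z' < (rest.length : Int)
          · rw [if_pos h3, if_pos (by push_cast [List.length_cons]; omega)]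
            have hdrop : (c :: t).drop ((1 + z' + 1)).toNat = t.drop ((z' + 1)).toNat := by
              have h4 : ((1 + z' + 1)).toNat = ((z' + 1)).toNat + 1 := by omega
              rw [h4]; simp
            rw [hdrop]
            exact Prod.ext (by ring) (Prod.ext rfl (by ring))
          · rw [if_neg h3, if_neg (by push_cast [List.length_cons] at *; omega)]
            refine Prod.ext (by push_cast [List.length_cons]; ring) (Prod.ext (by simp) (by push_cast [List.length_cons]; ring))


theorem huffman_3_eq_alt (s : String) : huffman_3 s = huffman_3_alt s := by
  have hzeq : PySem.Str.find s "0" = PySem.Chars.find s.toList ['0'] := by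
    rw [PySem.Str.find_eq]; rfl
  rcases hs : s.toList with _ | ⟨c0, t0⟩
  · have hall : s = "" := str_eq s "" (by rw [hs]; rfl)
    subst hall
    decide
  · rw [huffman_3, huffman_3_alt]
    by_cases hc0 : c0 = '0'
    · -- A takes the '0' branch; B has z = 0
      have hbit : (read_and_pop s 1).1 = "0" := by
        apply str_eq; rw [rap_fst, hs, hc0]; rfl
      have hz : PySem.Str.find s "0" = 0 := by
        rw [hzeq, hs, hc0]; exact find0_cons_head t0
      simp only [hz, hbit, reduceIte]
      have hsnd : (read_and_pop s 1).2.toList = t0 := by rw [rap_snd, hs]; rfl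
      have hA1 : (read_and_pop (read_and_pop s 1).2 1).1 = PySem.Str.slice s (some 1) (some 2) := by
        apply str_eq
        rw [rap_fst, hsnd]
        rw [show (1:Int) = ((1:Nat):Int) by norm_num, show (2:Int) = ((2:Nat):Int) by norm_num,
          toList_slice_nat, hs]
        rfl
      have hA2 : (read_and_pop (read_and_pop s 1).2 1).2 = PySem.Str.slice s (some 2) none := by
        apply str_eq
        rw [rap_snd, hsnd]
        rw [show (2:Int) = ((2:Nat):Int) by norm_num, toList_slice_from, hs]
        rfl
      rw [hA1, hA2]
      by_cases hb : PySem.Str.slice s (some 1) (some 2) = "0" <;> simp [hb]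
    · -- A takes the loop; B has z ≠ 0
      have hbit : (read_and_pop s 1).1 ≠ "0" := by
        apply str_ne; rw [rap_fst, hs]; simp [hc0]
      have hrange : PySem.List.pyRange 0 (bit_len_map 3 - 3) 1 = [0, 1, 2, 3, 4, 5, 6] := by decide
      rw [if_neg hbit, hrange, loop_eq]
      have hsnd : (read_and_pop s 1).2.toList = t0 := by rw [rap_snd, hs]; rfl
      have hfind := find0_cons_ne c0 t0 hc0
      rw [hsnd, hzeq, hs, hfind]
      by_cases h2 : PySem.Chars.find t0 ['0'] = -1
      · -- no '0' at all: both return (9, s[8:], 8)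
        simp only [h2, reduceIte]
        have hcA : ¬ ((0:Int) ≤ -1 ∧ (-1:Int) < (([0,1,2,3,4,5,6] : List Int).length : Int)) := by
          simp
        rw [if_neg hcA, if_neg (by norm_num), if_pos (by norm_num)]
        refine Prod.ext (by norm_num) (Prod.ext ?_ (by norm_num))
        apply str_eq
        rw [show (8:Int) = ((8:Nat):Int) by norm_num, toList_slice_from, hs]
        simp
      · obtain ⟨hge, hlt⟩ := find0_nonneg_lt t0 h2
        set z' := PySem.Chars.find t0 ['0'] with hz'
        simp only [if_neg h2]
        have hz0 : ¬ ((1 + z' : Int) = 0) := by omega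
        rw [if_neg hz0, show (([0,1,2,3,4,5,6] : List Int).length) = 7 from rfl]
        by_cases h3 : z' < 7
        · -- break within the loop
          have hcA : (0:Int) ≤ z' ∧ (z' : Int) < ((7 : Nat) : Int) := by
            refine ⟨hge, by push_cast; omega⟩
          have hcB : ¬ ((1 + z' : Int) < 0 ∨ (8:Int) ≤ 1 + z') := by omega
          rw [if_pos hcA, if_neg hcB]
          refine Prod.ext (by ring) (Prod.ext ?_ (by ring))
          apply str_eq
          rw [toList_slice_from_int s (1 + z' + 1) (by omega), hs]
          simp
          have h4 : ((1 + z' + 1)).toNat = ((1 + z')).toNat + 1 := by omega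
          have h5 : ((1 + z')).toNat = ((z' + 1)).toNat := by omega
          rw [h4, h5]
          simp
        · -- first '0' beyond the 7 extra bits: cap at 8 bits
          have hcA : ¬ ((0:Int) ≤ z' ∧ (z' : Int) < ((7 : Nat) : Int)) := by
            push_cast; omega
          have hcB : (1 + z' : Int) < 0 ∨ (8:Int) ≤ 1 + z' := by right; omega
          rw [if_neg hcA, if_pos hcB]
          refine Prod.ext (by norm_num) (Prod.ext ?_ (by norm_num))
          apply str_eq
          rw [show (8:Int) = ((8:Nat):Int) by norm_num, toList_slice_from, hs]
          simp

-- ===== VERDICT (by name: the statement is the Claim_ definition above) =====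
theorem huffman_3_spec : Claim_equal_huffman_3 := by
  intro s _
  unfold Spec_huffman_3
  exact huffman_3_eq_alt s
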